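-- pv_equiv track=rewrite | github.com/dod-advana/gamechanger-data | dataPipelines/old_pipelines/gc_eda_pipeline/metadata/pds_extract_json.py | populate_address
-- ===== SOURCE A (Python) =====
-- def populate_address(data) -> (str, str, str, str):
--     contract_admin_office_row_id = None
--     paying_office_row_id = None
--     contract_admin_agency_name = None
--     contract_admin_office_dodaac = None
--     contract_payment_office_name = None
--     contract_payment_office_dodaac = None
--     if "address_details_eda_ext_n" in data:
--         for address_detail in data["address_details_eda_ext_n"]:
--             if address_detail.get("address_desc_eda_ext") == "Contract Administrative Office":
--                 contract_admin_office_row_id = address_detail.get("row_id_eda_ext")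
--             if address_detail.get("address_desc_eda_ext") == "Paying Office":
--                 paying_office_row_id = address_detail.get("row_id_eda_ext")
--
--     if "address_eda_ext_n" in data:
--         for address in data["address_eda_ext_n"]:
--             if address.get("fk_address_details_eda_ext") == contract_admin_office_row_id:
--                 contract_admin_agency_name = address.get("org_name_eda_ext")
--                 contract_admin_office_dodaac = address.get("orgid_dodaac_eda_ext")
--
--             if address.get("fk_address_details_eda_ext") == paying_office_row_id:
--                 contract_payment_office_name = address.get("org_name_eda_ext")
--                 contract_payment_office_dodaac = address.get("orgid_dodaac_eda_ext")
--
--     return contract_admin_agency_name, contract_admin_office_dodaac, contract_payment_office_name, contract_payment_office_dodaac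
-- ===== SOURCE B (Python) =====
-- def populate_address(data) -> (str, str, str, str):
--     def last_match(rows, key, want):
--         # recursion on the list structure: the result from the tail takes
--         # precedence, so the last matching row wins without any accumulator
--         if not rows:
--             return None
--         tail = last_match(rows[1:], key, want)
--         if tail is not None:
--             return tail
--         return rows[0] if rows[0].get(key) == want else None
--
--     details = data.get("address_details_eda_ext_n") or []
--     addrs = data.get("address_eda_ext_n") or []
--
--     admin_row = last_match(details, "address_desc_eda_ext", "Contract Administrative Office")
--     pay_row = last_match(details, "address_desc_eda_ext", "Paying Office")
--     admin_rid = admin_row.get("row_id_eda_ext") if admin_row is not None else None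
--     pay_rid = pay_row.get("row_id_eda_ext") if pay_row is not None else None
--
--     admin = last_match(addrs, "fk_address_details_eda_ext", admin_rid)
--     paying = last_match(addrs, "fk_address_details_eda_ext", pay_rid)
--     return (admin.get("org_name_eda_ext") if admin is not None else None,
--             admin.get("orgid_dodaac_eda_ext") if admin is not None else None,
--             paying.get("org_name_eda_ext") if paying is not None else None,
--             paying.get("orgid_dodaac_eda_ext") if paying is not None else None)
-- ===== Notes on version B (the rewrite author's own statement) =====
-- stated objective: alternative
-- what changed: Replaces A's two imperative accumulate-over-every-row loops by a single recursive helper last_match that recurses on the list structure with tail-result precedence (so the last match wins by construction), applied four times; no mutable accumulators and no second scan of fields inside the loops.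
import Mathlib
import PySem

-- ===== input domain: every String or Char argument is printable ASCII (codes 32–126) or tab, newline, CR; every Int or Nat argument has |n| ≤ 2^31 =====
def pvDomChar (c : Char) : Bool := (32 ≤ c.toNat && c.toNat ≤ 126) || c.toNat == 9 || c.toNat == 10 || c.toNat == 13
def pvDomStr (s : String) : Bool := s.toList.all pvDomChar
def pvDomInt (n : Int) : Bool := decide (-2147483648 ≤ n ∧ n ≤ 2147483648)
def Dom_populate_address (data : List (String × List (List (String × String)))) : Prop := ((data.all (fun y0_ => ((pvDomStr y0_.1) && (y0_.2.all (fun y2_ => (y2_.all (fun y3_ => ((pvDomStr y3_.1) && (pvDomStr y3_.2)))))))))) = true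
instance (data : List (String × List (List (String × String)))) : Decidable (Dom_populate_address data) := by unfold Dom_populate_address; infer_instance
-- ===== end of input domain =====

-- B replaces A's two accumulate-over-every-row loops by one recursive helper with
-- tail-result precedence (alternative decomposition; same asymptotic cost).

-- ===== PORT A =====
-- dict.get on an inner row
def pvRowGet (row : List (String × String)) (k : String) : Option String :=
  (PySem.Dict.mk row).get? k

def populate_address (data : List (String × List (List (String × String)))) : Option String × Option String × Option String × Option String :=
  let d := PySem.Dict.mk data
  -- 'if key in data: for x in data[key]' iterates data[key] when present, nothing otherwise
  let details := (d.get? "address_details_eda_ext_n").getD []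
  let rids : Option String × Option String :=
    details.foldl (fun acc det =>
      let acc1 := if pvRowGet det "address_desc_eda_ext" == some "Contract Administrative Office"
                  then (pvRowGet det "row_id_eda_ext", acc.2) else acc
      if pvRowGet det "address_desc_eda_ext" == some "Paying Office"
                  then (acc1.1, pvRowGet det "row_id_eda_ext") else acc1)
      (none, none)
  let addrs := (d.get? "address_eda_ext_n").getD []
  addrs.foldl (fun acc addr =>
      let acc1 := if pvRowGet addr "fk_address_details_eda_ext" == rids.1
                  then (pvRowGet addr "org_name_eda_ext", pvRowGet addr "orgid_dodaac_eda_ext", acc.2.2.1, acc.2.2.2)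
                  else acc
      if pvRowGet addr "fk_address_details_eda_ext" == rids.2
                  then (acc1.1, acc1.2.1, pvRowGet addr "org_name_eda_ext", pvRowGet addr "orgid_dodaac_eda_ext")
                  else acc1)
    (none, none, none, none)

-- ===== PORT B =====
-- Source B's last_match: recursion on the list, the tail's result takes precedence
def pvLastMatch (rows : List (List (String × String))) (key : String) (want : Option String) :
    Option (List (String × String)) :=
  match rows with
  | [] => none
  | r :: rest =>
    match pvLastMatch rest key want with
    | some t => some t
    | none => if pvRowGet r key == want then some r else none

-- 'row.get(k) if row is not None else None'
def pvFieldOf (row? : Option (List (String × String))) (k : String) : Option String :=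
  match row? with
  | some row => pvRowGet row k
  | none => none

def populate_address_alt (data : List (String × List (List (String × String)))) : Option String × Option String × Option String × Option String :=
  let d := PySem.Dict.mk data
  let details := (d.get? "address_details_eda_ext_n").getD []
  let addrs := (d.get? "address_eda_ext_n").getD []
  let admin_rid := pvFieldOf (pvLastMatch details "address_desc_eda_ext" (some "Contract Administrative Office")) "row_id_eda_ext"
  let pay_rid := pvFieldOf (pvLastMatch details "address_desc_eda_ext" (some "Paying Office")) "row_id_eda_ext"
  let admin := pvLastMatch addrs "fk_address_details_eda_ext" admin_rid
  let paying := pvLastMatch addrs "fk_address_details_eda_ext" pay_rid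
  (pvFieldOf admin "org_name_eda_ext", pvFieldOf admin "orgid_dodaac_eda_ext",
   pvFieldOf paying "org_name_eda_ext", pvFieldOf paying "orgid_dodaac_eda_ext")

-- ===== PRECONDITION & SPEC =====
def Spec_populate_address (data : List (String × List (List (String × String)))) (out : Option String × Option String × Option String × Option String) : Prop := out = populate_address_alt data
instance (data : List (String × List (List (String × String)))) (out : Option String × Option String × Option String × Option String) : Decidable (Spec_populate_address data out) := by unfold Spec_populate_address; infer_instance

-- ===== CLAIM (what is proved, stated in full; the proofs are below) =====
def Claim_equal_populate_address : Prop := ∀ (data : List (String × List (List (String × String)))), Dom_populate_address data → Spec_populate_address data (populate_address data)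

-- ===== LEMMAS AND PROOFS =====

-- B's recursion computes the last matching row, i.e. the first match of the reversed list.
theorem pvLastMatch_eq_find (rows : List (List (String × String))) (key : String) (want : Option String) :
    pvLastMatch rows key want = rows.reverse.find? (fun r => pvRowGet r key == want) := by
  induction rows with
  | nil => simp [pvLastMatch]
  | cons r rest ih =>
    simp only [pvLastMatch, ih, List.reverse_cons, List.find?_append]
    cases rest.reverse.find? (fun r => pvRowGet r key == want) <;>
      cases h : (pvRowGet r key == want) <;> simp [List.find?, h]

-- A's first loop (last match wins, per component) equals reverse first-match searches.
theorem loop1_eq (details : List (List (String × String))) (acc : Option String × Option String) :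
    details.foldl (fun acc det =>
      let acc1 := if pvRowGet det "address_desc_eda_ext" == some "Contract Administrative Office"
                  then (pvRowGet det "row_id_eda_ext", acc.2) else acc
      if pvRowGet det "address_desc_eda_ext" == some "Paying Office"
                  then (acc1.1, pvRowGet det "row_id_eda_ext") else acc1) acc
    = ((match details.reverse.find? (fun det => pvRowGet det "address_desc_eda_ext" == some "Contract Administrative Office") with
        | some det => pvRowGet det "row_id_eda_ext" | none => acc.1),
       (match details.reverse.find? (fun det => pvRowGet det "address_desc_eda_ext" == some "Paying Office") with
        | some det => pvRowGet det "row_id_eda_ext" | none => acc.2)) := by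
  induction details generalizing acc with
  | nil => simp
  | cons det rest ih =>
    cases hb1 : (pvRowGet det "address_desc_eda_ext" == some "Contract Administrative Office") <;>
    cases hb2 : (pvRowGet det "address_desc_eda_ext" == some "Paying Office") <;>
      simp only [List.foldl_cons, List.reverse_cons, List.find?_append, List.find?_cons,
                 List.find?_nil, hb1, hb2, ih] <;>
    cases h1 : rest.reverse.find? (fun det => pvRowGet det "address_desc_eda_ext" == some "Contract Administrative Office") <;>
    cases h2 : rest.reverse.find? (fun det => pvRowGet det "address_desc_eda_ext" == some "Paying Office") <;>
      simp_all

-- A's second loop equals the reverse first-match searches for the two row ids.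
theorem loop2_eq (ar pr : Option String) (addrs : List (List (String × String)))
    (acc : Option String × Option String × Option String × Option String) :
    addrs.foldl (fun acc addr =>
      let acc1 := if pvRowGet addr "fk_address_details_eda_ext" == ar
                  then (pvRowGet addr "org_name_eda_ext", pvRowGet addr "orgid_dodaac_eda_ext", acc.2.2.1, acc.2.2.2)
                  else acc
      if pvRowGet addr "fk_address_details_eda_ext" == pr
                  then (acc1.1, acc1.2.1, pvRowGet addr "org_name_eda_ext", pvRowGet addr "orgid_dodaac_eda_ext")
                  else acc1) acc
    = ((match addrs.reverse.find? (fun a => pvRowGet a "fk_address_details_eda_ext" == ar) with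
        | some a => pvRowGet a "org_name_eda_ext" | none => acc.1),
       (match addrs.reverse.find? (fun a => pvRowGet a "fk_address_details_eda_ext" == ar) with
        | some a => pvRowGet a "orgid_dodaac_eda_ext" | none => acc.2.1),
       (match addrs.reverse.find? (fun a => pvRowGet a "fk_address_details_eda_ext" == pr) with
        | some a => pvRowGet a "org_name_eda_ext" | none => acc.2.2.1),
       (match addrs.reverse.find? (fun a => pvRowGet a "fk_address_details_eda_ext" == pr) with
        | some a => pvRowGet a "orgid_dodaac_eda_ext" | none => acc.2.2.2)) := by
  induction addrs generalizing acc with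
  | nil => simp
  | cons addr rest ih =>
    cases hb1 : (pvRowGet addr "fk_address_details_eda_ext" == ar) <;>
    cases hb2 : (pvRowGet addr "fk_address_details_eda_ext" == pr) <;>
      simp only [List.foldl_cons, List.reverse_cons, List.find?_append, List.find?_cons,
                 List.find?_nil, hb1, hb2, ih] <;>
    cases h1 : rest.reverse.find? (fun a => pvRowGet a "fk_address_details_eda_ext" == ar) <;>
    cases h2 : rest.reverse.find? (fun a => pvRowGet a "fk_address_details_eda_ext" == pr) <;>
      simp_all

-- ===== VERDICT (by name: the statement is the Claim_ definition above) =====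
theorem populate_address_spec : Claim_equal_populate_address := by
  intro data _
  unfold Spec_populate_address populate_address populate_address_alt
  simp only [loop1_eq, loop2_eq, pvLastMatch_eq_find, pvFieldOf]
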